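-- pv_equiv track=rewrite | github.com/VISHWAJEET617/railway-db-bot | tgbot/railway_adapter.py | _has_tos_modal
-- ===== SOURCE A (Python) =====
-- def _has_tos_modal(text: str) -> bool:
--     """
--     Only returns True when Railway's actual TOS *modal* is open.
--     'Terms of Service' alone is a footer link present on every page — ignore it.
--     We look for phrases that only appear inside the modal itself.
--     """
--     modal_phrases = [
--         "keep it cool for everyone",
--         "you must accept our terms",
--         "agree to our terms",
--         "privacy and data policy",
--         "i will not deploy",
--         "scroll to read",
--     ]
--     tl = text.lower()
--     return any(p in tl for p in modal_phrases)
-- ===== SOURCE B (Python) =====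
-- _MODAL_PHRASES = [
--     "keep it cool for everyone",
--     "you must accept our terms",
--     "agree to our terms",
--     "privacy and data policy",
--     "i will not deploy",
--     "scroll to read",
-- ]
--
-- def _has_tos_modal(text: str) -> bool:
--     # Single left-to-right pass over positions; at each position test whether
--     # any modal phrase starts there (instead of six independent substring scans).
--     tl = text.lower()
--     for i in range(len(tl)):
--         for p in _MODAL_PHRASES:
--             if tl.startswith(p, i):
--                 return True
--     return False
-- ===== Notes on version B (the rewrite author's own statement) =====
-- stated objective: alternative
-- what changed: Replaces six independent substring scans (any(p in tl)) by one left-to-right pass over positions that tests at each position whether any phrase starts there.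
import Mathlib
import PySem

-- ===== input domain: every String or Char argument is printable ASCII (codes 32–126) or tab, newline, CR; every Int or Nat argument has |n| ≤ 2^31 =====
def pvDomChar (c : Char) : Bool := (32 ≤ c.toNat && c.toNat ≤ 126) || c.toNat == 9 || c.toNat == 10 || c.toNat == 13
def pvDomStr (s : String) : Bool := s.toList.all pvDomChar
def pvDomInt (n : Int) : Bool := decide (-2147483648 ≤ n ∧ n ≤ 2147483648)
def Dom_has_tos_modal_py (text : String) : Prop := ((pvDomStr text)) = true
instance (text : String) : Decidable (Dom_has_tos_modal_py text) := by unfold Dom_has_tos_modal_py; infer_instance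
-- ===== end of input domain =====

-- B replaces six independent substring scans by one pass over positions (alternative decomposition, same cost class).

-- ===== PORT A =====
def pvModalPhrasesA : List String :=
  ["keep it cool for everyone",
   "you must accept our terms",
   "agree to our terms",
   "privacy and data policy",
   "i will not deploy",
   "scroll to read"]

def has_tos_modal_py (text : String) : Bool :=
  let tl := PySem.Str.lower text
  pvModalPhrasesA.any (fun p => PySem.Str.isIn p tl)

-- ===== PORT B =====
def pvModalPhrasesB : List (List Char) :=
  ["keep it cool for everyone".toList,
   "you must accept our terms".toList,
   "agree to our terms".toList,
   "privacy and data policy".toList,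
   "i will not deploy".toList,
   "scroll to read".toList]

-- one pass over positions: at each suffix, does some phrase start here?
def pvScan : List Char → Bool
  | [] => false
  | c :: rest =>
    if pvModalPhrasesB.any (fun p => p.isPrefixOf (c :: rest)) then true
    else pvScan rest

def has_tos_modal_py_alt (text : String) : Bool :=
  pvScan (PySem.Str.lower text).toList

-- ===== PRECONDITION & SPEC =====
def Spec_has_tos_modal_py (text : String) (out : Bool) : Prop := out = has_tos_modal_py_alt text
instance (text : String) (out : Bool) : Decidable (Spec_has_tos_modal_py text out) := by unfold Spec_has_tos_modal_py; infer_instance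

-- ===== CLAIM (what is proved, stated in full; the proofs are below) =====
def Claim_equal_has_tos_modal_py : Prop := ∀ (text : String), Dom_has_tos_modal_py text → Spec_has_tos_modal_py text (has_tos_modal_py text)

-- ===== LEMMAS AND PROOFS =====

lemma pvPhrases_eq : pvModalPhrasesA.map String.toList = pvModalPhrasesB := by decide

lemma pvPhrases_ne_nil : ∀ p ∈ pvModalPhrasesB, p ≠ [] := by decide

lemma pvScan_iff (l : List Char) :
    pvScan l = true ↔ ∃ p ∈ pvModalPhrasesB, p <:+: l := by
  induction l with
  | nil =>
    simp only [pvScan, Bool.false_eq_true, false_iff]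
    rintro ⟨p, hp, hinf⟩
    exact pvPhrases_ne_nil p hp (List.eq_nil_of_infix_nil hinf)
  | cons c rest ih =>
    simp only [pvScan]
    rcases hAny : pvModalPhrasesB.any (fun p => p.isPrefixOf (c :: rest)) with _ | _
    · simp only [Bool.false_eq_true, if_false, ih]
      constructor
      · rintro ⟨p, hp, hinf⟩; exact ⟨p, hp, hinf.trans (List.suffix_cons c rest).isInfix⟩
      · rintro ⟨p, hp, hinf⟩
        rcases List.infix_cons_iff.mp hinf with hpre | hinf'
        · have : pvModalPhrasesB.any (fun p => p.isPrefixOf (c :: rest)) = true :=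
            List.any_eq_true.mpr ⟨p, hp, List.isPrefixOf_iff_prefix.mpr hpre⟩
          rw [hAny] at this; cases this
        · exact ⟨p, hp, hinf'⟩
    · simp only [if_true, true_iff]
      rcases List.any_eq_true.mp hAny with ⟨p, hp, hpre⟩
      exact ⟨p, hp, (List.isPrefixOf_iff_prefix.mp hpre).isInfix⟩

-- ===== VERDICT (by name: the statement is the Claim_ definition above) =====
theorem has_tos_modal_py_spec : Claim_equal_has_tos_modal_py := by
  intro text _
  unfold Spec_has_tos_modal_py has_tos_modal_py has_tos_modal_py_alt
  apply Bool.eq_iff_iff.mpr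
  rw [List.any_eq_true, pvScan_iff]
  constructor
  · rintro ⟨p, hp, hIn⟩
    refine ⟨p.toList, ?_, (PySem.Str.isIn_iff_infix _ _).mp hIn⟩
    rw [← pvPhrases_eq]; exact List.mem_map_of_mem hp
  · rintro ⟨q, hq, hinf⟩
    rw [← pvPhrases_eq] at hq
    rcases List.mem_map.mp hq with ⟨p, hp, rfl⟩
    exact ⟨p, hp, (PySem.Str.isIn_iff_infix _ _).mpr hinf⟩
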